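-- pv_equiv track=rewrite | github.com/Narasimhat/AmrithaNobelCoach | app.py | diary_summary_from_history
-- ===== SOURCE A (Python) =====
-- from typing import Dict, List, Optional, Tuple
--
-- def diary_summary_from_history(history: List[dict]) -> Dict[str, str]:
--     user_msgs = [msg["content"] for msg in history if msg["role"] == "user"]
--     coach_msgs = [msg["content"] for msg in history if msg["role"] == "assistant"]
--     summary = {
--         "big_question": user_msgs[0] if user_msgs else "",
--         "what_we_tried": "\n\n".join(user_msgs[1:3]) if len(user_msgs) > 1 else "",
--         "what_we_found": coach_msgs[-1] if coach_msgs else "",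
--         "how_ai_might_be_wrong": "",
--         "next_step": coach_msgs[-1] if coach_msgs else "",
--         "gratitude": "",
--         "kindness_act": "",
--         "planet_act": "",
--     }
--     return summary
-- ===== SOURCE B (Python) =====
-- def diary_summary_from_history(history):
--     first_user = None
--     tried = []
--     n_user = 0
--     last_coach = None
--     for msg in history:
--         role = msg["role"]
--         if role == "user":
--             content = msg["content"]
--             if n_user == 0:
--                 first_user = content
--             elif n_user < 3:
--                 tried.append(content)
--             n_user += 1
--         elif role == "assistant":
--             last_coach = msg["content"]
--     found = last_coach if last_coach is not None else ""
--     return {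
--         "big_question": first_user if first_user is not None else "",
--         "what_we_tried": "\n\n".join(tried) if n_user > 1 else "",
--         "what_we_found": found,
--         "how_ai_might_be_wrong": "",
--         "next_step": found,
--         "gratitude": "",
--         "kindness_act": "",
--         "planet_act": "",
--     }
-- ===== Notes on version B (the rewrite author's own statement) =====
-- stated objective: alternative
-- what changed: Replaces the two role-filtered list comprehensions plus indexing/slicing with a single pass over history that maintains scalar accumulators (first user message, a buffer of the 2nd-3rd user messages, a user counter, and the last assistant message).
import Mathlib
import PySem

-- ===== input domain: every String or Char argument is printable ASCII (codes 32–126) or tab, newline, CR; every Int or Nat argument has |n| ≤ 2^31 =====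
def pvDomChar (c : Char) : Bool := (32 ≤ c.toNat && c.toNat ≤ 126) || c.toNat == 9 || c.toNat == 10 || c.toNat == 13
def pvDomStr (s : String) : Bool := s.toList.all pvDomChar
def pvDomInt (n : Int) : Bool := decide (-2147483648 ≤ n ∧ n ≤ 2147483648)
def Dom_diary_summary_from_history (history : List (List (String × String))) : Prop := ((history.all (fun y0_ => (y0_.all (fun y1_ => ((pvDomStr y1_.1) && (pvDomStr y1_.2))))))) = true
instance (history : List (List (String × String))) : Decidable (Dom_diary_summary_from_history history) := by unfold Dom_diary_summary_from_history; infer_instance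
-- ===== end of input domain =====

-- B replaces A's two role-filtered comprehensions with one pass over history keeping
-- scalar accumulators (first user msg, buffer of 2nd-3rd user msgs, user counter, last assistant msg).


-- dict lookup msg[k] (first-class Python dict built from the pair list); none = KeyError
def pvLookup (m : List (String × String)) (k : String) : Option String :=
  (PySem.Dict.ofList m).get? k

-- ===== PORT A =====
def diary_summary_from_history (history : List (List (String × String))) : List (String × String) :=
  let user_msgs := (history.filter (fun m => pvLookup m "role" == some "user")).map
      (fun m => (pvLookup m "content").getD "")
  let coach_msgs := (history.filter (fun m => pvLookup m "role" == some "assistant")).map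
      (fun m => (pvLookup m "content").getD "")
  [("big_question", if user_msgs.isEmpty then "" else ((PySem.List.pyGet? user_msgs 0).getD "")),
   ("what_we_tried", if user_msgs.length > 1 then PySem.Str.join "\n\n" (PySem.List.slice user_msgs (some 1) (some 3)) else ""),
   ("what_we_found", if coach_msgs.isEmpty then "" else ((PySem.List.pyGet? coach_msgs (-1)).getD "")),
   ("how_ai_might_be_wrong", ""),
   ("next_step", if coach_msgs.isEmpty then "" else ((PySem.List.pyGet? coach_msgs (-1)).getD "")),
   ("gratitude", ""),
   ("kindness_act", ""),
   ("planet_act", "")]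

-- ===== PORT B =====
-- loop state: (first_user, tried, n_user, last_coach)
def pvStep (st : Option String × List String × Nat × Option String)
    (m : List (String × String)) : Option String × List String × Nat × Option String :=
  let role := pvLookup m "role"
  if role == some "user" then
    let c := (pvLookup m "content").getD ""
    if st.2.2.1 == 0 then (some c, st.2.1, st.2.2.1 + 1, st.2.2.2)
    else if st.2.2.1 < 3 then (st.1, st.2.1 ++ [c], st.2.2.1 + 1, st.2.2.2)
    else (st.1, st.2.1, st.2.2.1 + 1, st.2.2.2)
  else if role == some "assistant" then
    (st.1, st.2.1, st.2.2.1, some ((pvLookup m "content").getD ""))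
  else st

def diary_summary_from_history_alt (history : List (List (String × String))) : List (String × String) :=
  let st := history.foldl pvStep (none, [], 0, none)
  let found := st.2.2.2.getD ""
  [("big_question", st.1.getD ""),
   ("what_we_tried", if st.2.2.1 > 1 then PySem.Str.join "\n\n" st.2.1 else ""),
   ("what_we_found", found),
   ("how_ai_might_be_wrong", ""),
   ("next_step", found),
   ("gratitude", ""),
   ("kindness_act", ""),
   ("planet_act", "")]

-- ===== PRECONDITION & SPEC =====
-- Pre_ excludes exactly the inputs where Python A raises KeyError: a message without a
-- "role" key, or a user/assistant message without a "content" key.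
def Pre_diary_summary_from_history (history : List (List (String × String))) : Prop :=
  ∀ m ∈ history, (pvLookup m "role").isSome ∧
    ((pvLookup m "role" = some "user" ∨ pvLookup m "role" = some "assistant") →
      (pvLookup m "content").isSome)
instance (history : List (List (String × String))) : Decidable (Pre_diary_summary_from_history history) := by unfold Pre_diary_summary_from_history; infer_instance
def pvWitness_diary_summary_from_history : (List (List (String × String))) :=
  [[("role", "user"), ("content", "hi")], [("role", "assistant"), ("content", "hello")]]

def Spec_diary_summary_from_history (history : List (List (String × String))) (out : List (String × String)) : Prop := out = diary_summary_from_history_alt history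
instance (history : List (List (String × String))) (out : List (String × String)) : Decidable (Spec_diary_summary_from_history history out) := by unfold Spec_diary_summary_from_history; infer_instance

-- ===== CLAIM (what is proved, stated in full; the proofs are below) =====
def Claim_equal_diary_summary_from_history : Prop := ∀ (history : List (List (String × String))), Dom_diary_summary_from_history history → Pre_diary_summary_from_history history → Spec_diary_summary_from_history history (diary_summary_from_history history)

-- ===== LEMMAS AND PROOFS =====

-- A's filtered/mapped lists
def pvU (history : List (List (String × String))) : List String :=
  (history.filter (fun m => pvLookup m "role" == some "user")).map
    (fun m => (pvLookup m "content").getD "")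
def pvC (history : List (List (String × String))) : List String :=
  (history.filter (fun m => pvLookup m "role" == some "assistant")).map
    (fun m => (pvLookup m "content").getD "")

theorem pvStep_invariant (history : List (List (String × String))) :
    history.foldl pvStep (none, [], 0, none) =
      ((pvU history).head?, ((pvU history).drop 1).take 2, (pvU history).length,
        (pvC history).getLast?) := by
  induction history using List.reverseRecOn with
  | nil => simp [pvU, pvC]
  | append_singleton xs m ih =>
    have hU : pvU (xs ++ [m]) = pvU xs ++ (if pvLookup m "role" == some "user" then [(pvLookup m "content").getD ""] else []) := by
      simp [pvU, List.filter_append]; split <;> simp_all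
    have hC : pvC (xs ++ [m]) = pvC xs ++ (if pvLookup m "role" == some "assistant" then [(pvLookup m "content").getD ""] else []) := by
      simp [pvC, List.filter_append]; split <;> simp_all
    rw [List.foldl_append, ih, hU, hC]
    by_cases hu : pvLookup m "role" == some "user"
    · have hna : ¬ (pvLookup m "role" == some "assistant") = true := by simp_all
      simp only [beq_iff_eq] at hu
      rcases hp : pvU xs with _ | ⟨x, rest⟩
      · simp [pvStep, hu]
      · rcases rest with _ | ⟨y, rest2⟩
        · simp [pvStep, hu]
        · rcases rest2 with _ | ⟨z, rest3⟩
          · simp [pvStep, hu]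
          · simp [pvStep, hu, List.take_succ_cons]
    · by_cases ha : pvLookup m "role" == some "assistant"
      · simp only [beq_iff_eq] at ha
        simp [pvStep, ha]
      · simp_all [pvStep]

theorem pvFirst (U : List String) :
    (if U.isEmpty then "" else ((PySem.List.pyGet? U 0).getD "")) = U.head?.getD "" := by
  cases U <;> simp [PySem.List.pyGet?, PySem.List.pyIdx?]

theorem pvSlice13 (U : List String) :
    PySem.List.slice U (some 1) (some 3) = (U.drop 1).take 2 := by
  simpa using PySem.List.slice_natCast (xs := U) (a := 1) (b := 3)

theorem pvLast (C : List String) :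
    (if C.isEmpty then "" else ((PySem.List.pyGet? C (-1)).getD "")) = C.getLast?.getD "" := by
  rcases h : C.getLast? with _ | x <;>
    cases C <;> simp_all [PySem.List.pyGet?_neg_one]

-- ===== VERDICT (by name: the statement is the Claim_ definition above) =====
theorem diary_summary_from_history_spec : Claim_equal_diary_summary_from_history := by
  intro history _ _
  unfold Spec_diary_summary_from_history diary_summary_from_history diary_summary_from_history_alt
  rw [pvStep_invariant]
  simp only [pvFirst, pvSlice13, pvLast]
  rfl
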